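-- pv_equiv track=rewrite | github.com/doozan/wikibot | utils.py | nest_aware_iterator
-- ===== SOURCE A (Python) =====
-- def get_nest_depth(text, opener, closer, start_depth=0):
--     """ Returns the level of depth inside ```start``` at the end of the line
--     opener and closer are the nest opening and closing strings
--     starting_depth, optional is the starting depth level
--
--     zero }} zero {{ one {{ two {{ three }} two }} one }} zero }} zero
--     """
--
--     if start_depth < 0:
--         raise ValueError("start_level cannot be negative")
--
--     depth = start_depth
--
--     first = True
--     for t in text.split(opener):
--         if first:
--             first = False
--             if not depth:
--                 continue
--         else:
--             depth += 1
--
--         depth = max(0, depth - t.count(closer))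
--
--     return depth
--
-- def nest_aware_iterator(iterator, nests, delimiter=""):
--     results = []
--     items = []
--     depth = {}
--
--     for item in iterator:
--         items.append(item)
--         depth = { nest:get_nest_depth(item, nest[0], nest[1], depth.get(nest, 0)) for nest in nests }
--         if any(depth.values()):
--             continue
--
--         yield delimiter.join(items)
--         items = []
--
--     if len(items):
--         yield delimiter.join(items)
-- ===== SOURCE B (Python) =====
-- def _transfer(text, opener, closer):
--     """Depth-transfer map of text for one nest, as a max-plus pair (shift, floor):
--     a start depth d >= 0 becomes max(floor, d + shift).  shift is the net event
--     sum (+1 per opener occurrence, -count(closer) per segment between them),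
--     floor the composed zero-clamp; independent of the incoming depth."""
--     shift = 0
--     floor = 0
--     for i, seg in enumerate(text.split(opener)):
--         if i:
--             shift += 1
--             floor += 1
--         c = seg.count(closer)
--         shift -= c
--         floor = max(0, floor - c)
--     return shift, floor
--
-- def nest_aware_iterator(iterator, nests, delimiter=""):
--     items = list(iterator)
--     nests = list(nests)
--     # stage 1: per-item, per-nest transfer maps (depth-independent summaries)
--     transfers = [[_transfer(item, o, c) for o, c in nests] for item in items]
--     # stage 2: compose the maps left to right; flag positions where all depths are 0
--     flags = []
--     depths = [0] * len(nests)
--     for tr in transfers: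
--         depths = [max(floor, d + shift) for (shift, floor), d in zip(tr, depths)]
--         flags.append(not any(depths))
--     # stage 3: cut the item list at the flagged positions
--     start = 0
--     for i, f in enumerate(flags):
--         if f:
--             yield delimiter.join(items[start:i + 1])
--             start = i + 1
--     if start < len(items):
--         yield delimiter.join(items[start:])
-- ===== Notes on version B (the rewrite author's own statement) =====
-- stated objective: alternative
-- what changed: B is a three-stage pipeline: each (item, nest) is first summarized into a depth-independent max-plus transfer map (shift, floor) with new_depth = max(floor, d + shift), these O(1)-composable maps are then folded into a boolean flag per position (all depths zero), and finally the item list is cut at the flagged indices by slicing -- instead of A's single loop that re-scans each item with the running depth threaded through get_nest_depth and buffers pending items.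
import Mathlib
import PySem

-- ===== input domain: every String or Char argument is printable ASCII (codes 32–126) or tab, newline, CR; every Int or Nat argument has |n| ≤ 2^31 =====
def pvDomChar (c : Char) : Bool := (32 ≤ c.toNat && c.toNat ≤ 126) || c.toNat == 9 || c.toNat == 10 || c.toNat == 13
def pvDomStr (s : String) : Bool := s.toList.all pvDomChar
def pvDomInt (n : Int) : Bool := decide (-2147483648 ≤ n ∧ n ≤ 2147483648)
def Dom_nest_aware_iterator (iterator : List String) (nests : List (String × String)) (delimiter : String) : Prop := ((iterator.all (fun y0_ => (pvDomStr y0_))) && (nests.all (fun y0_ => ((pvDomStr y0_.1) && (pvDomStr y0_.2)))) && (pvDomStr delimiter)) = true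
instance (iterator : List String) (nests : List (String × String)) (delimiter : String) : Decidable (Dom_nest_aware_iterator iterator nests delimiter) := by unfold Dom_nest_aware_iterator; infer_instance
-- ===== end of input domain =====

-- B replaces A's single depth-threading loop by a staged pipeline: per-(item,nest)
-- depth-independent max-plus transfer maps (shift, floor), then a flag scan, then
-- cutting the item list at flagged indices (alternative decomposition, not faster).
-- A is a generator; both are compared on the list of yielded values (no argument is mutated).


-- ===== PORT A =====
-- loop body of get_nest_depth: state (depth, first), one split segment t per step
def pvGndFold (closer : List Char) (st : Int × Bool) (t : List Char) : Int × Bool :=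
  if st.2 then
    (if st.1 = 0 then st.1 else max 0 (st.1 - (PySem.Chars.count t closer : Int)), false)
  else (max 0 (st.1 + 1 - (PySem.Chars.count t closer : Int)), false)

-- none = ValueError (negative start_depth, or text.split('') on an empty opener)
def get_nest_depth (text opener closer : String) (start_depth : Int) : Option Int :=
  if start_depth < 0 then none
  else match PySem.Chars.split? text.toList opener.toList with
    | none => none
    | some segs => some (segs.foldl (pvGndFold closer.toList) (start_depth, true)).1

def nest_aware_iterator (iterator : List String) (nests : List (String × String)) (delimiter : String) : List String :=
  -- state: (results yielded so far, items, depth dict); '.getD 0' on get_nest_depth is junk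
  -- only where Python raises ValueError (empty opener), which Pre_ excludes
  let fin := iterator.foldl (fun st item =>
    let items := st.2.1 ++ [item]
    let depth := nests.foldl
      (fun d nest => d.insert nest ((get_nest_depth item nest.1 nest.2 (st.2.2.getD nest 0)).getD 0)) PySem.Dict.empty
    if depth.values.any (fun v => decide (v ≠ 0)) then (st.1, items, depth)
    else (st.1 ++ [PySem.Str.join delimiter items], ([] : List String), depth))
    ([], [], PySem.Dict.empty)
  if fin.2.1.length ≠ 0 then fin.1 ++ [PySem.Str.join delimiter fin.2.1] else fin.1

-- ===== PORT B =====
-- _transfer: max-plus summary (shift, floor) of one item for one nest;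
-- none = the ValueError Python raises on text.split('') (empty opener, outside Pre_)
def transfer (text opener closer : String) : Option (Int × Int) :=
  match PySem.Chars.split? text.toList opener.toList with
  | none => none
  | some segs => some ((PySem.List.enumerate segs 0).foldl
      (fun st q =>
        let st1 := if q.1 ≠ 0 then (st.1 + 1, st.2 + 1) else st
        let c : Int := (PySem.Chars.count q.2 closer.toList : Int)
        (st1.1 - c, max 0 (st1.2 - c)))
      ((0 : Int), (0 : Int)))

-- the per-item transfer row [ _transfer(item, o, c) for o, c in nests ]
def pvTr (nests : List (String × String)) (item : String) : List (Int × Int) :=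
  nests.map (fun p => (transfer item p.1 p.2).getD (0, 0))

-- depths = [max(floor, d + shift) for (shift, floor), d in zip(tr, depths)]
def pvStep (tr : List (Int × Int)) (ds : List Int) : List Int :=
  (tr.zip ds).map (fun q => max q.1.2 (q.2 + q.1.1))

def nest_aware_iterator_alt (iterator : List String) (nests : List (String × String)) (delimiter : String) : List String :=
  let items := iterator
  -- stage 1: per-item, per-nest transfer maps
  let transfers := items.map (pvTr nests)
  -- stage 2: compose the maps; flag positions where all depths are 0
  let fin := transfers.foldl
    (fun st tr =>
      let depths := pvStep tr st.2
      (st.1 ++ [!(depths.any (fun v => decide (v ≠ 0)))], depths))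
    (([] : List Bool), List.replicate nests.length (0 : Int))
  -- stage 3: cut the item list at the flagged positions
  let grp := (PySem.List.enumerate fin.1 0).foldl
    (fun st q =>
      if q.2 then
        (st.1 ++ [PySem.Str.join delimiter (PySem.List.slice items (some st.2) (some (q.1 + 1)))], q.1 + 1)
      else st)
    (([] : List String), (0 : Int))
  if grp.2 < PySem.List.len items then
    grp.1 ++ [PySem.Str.join delimiter (PySem.List.slice items (some grp.2) none)]
  else grp.1

-- ===== PRECONDITION & SPEC =====
-- Pre_ excludes only inputs where A raises: with a nonempty iterator, every nest opener must be
-- nonempty (Python str.split('') raises ValueError; B raises there too).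
def Pre_nest_aware_iterator (iterator : List String) (nests : List (String × String)) (delimiter : String) : Prop :=
  iterator = [] ∨ ∀ p ∈ nests, p.1 ≠ ""
instance (iterator : List String) (nests : List (String × String)) (delimiter : String) : Decidable (Pre_nest_aware_iterator iterator nests delimiter) := by unfold Pre_nest_aware_iterator; infer_instance

def pvWitness_nest_aware_iterator : List String × (List (String × String)) × String :=
  (["a{b", "c}d", "e"], [("{", "}")], ",")

def Spec_nest_aware_iterator (iterator : List String) (nests : List (String × String)) (delimiter : String) (out : List String) : Prop := out = nest_aware_iterator_alt iterator nests delimiter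
instance (iterator : List String) (nests : List (String × String)) (delimiter : String) (out : List String) : Decidable (Spec_nest_aware_iterator iterator nests delimiter out) := by unfold Spec_nest_aware_iterator; infer_instance

-- ===== CLAIM (what is proved, stated in full; the proofs are below) =====
def Claim_equal_nest_aware_iterator : Prop := ∀ (iterator : List String) (nests : List (String × String)) (delimiter : String), Dom_nest_aware_iterator iterator nests delimiter → Pre_nest_aware_iterator iterator nests delimiter → Spec_nest_aware_iterator iterator nests delimiter (nest_aware_iterator iterator nests delimiter)

-- ===== LEMMAS AND PROOFS =====

-- step lemmas of A's fold (definitional)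
theorem pvGndFold_false (closer : List Char) (x : Int) (seg : List Char) :
    pvGndFold closer (x, false) seg
      = (max 0 (x + 1 - (PySem.Chars.count seg closer : Int)), false) := rfl

theorem pvGndFold_true (closer : List Char) (x : Int) (seg : List Char) :
    pvGndFold closer (x, true) seg
      = (if x = 0 then x else max 0 (x - (PySem.Chars.count seg closer : Int)), false) := rfl

-- plain step of B's transfer fold once the enumerate index is nonzero
def pvTStep (closer : List Char) (st : Int × Int) (seg : List Char) : Int × Int :=
  (st.1 + 1 - (PySem.Chars.count seg closer : Int), max 0 (st.2 + 1 - (PySem.Chars.count seg closer : Int)))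

-- on the tail of the enumeration (index >= 1) B's fold is the plain pvTStep fold
theorem pvTransferTail (closer : List Char) : ∀ (segs : List (List Char)) (k : Int), 1 ≤ k →
    ∀ (st : Int × Int),
    ((PySem.List.enumerate segs k).foldl
      (fun st q =>
        let st1 := if q.1 ≠ 0 then (st.1 + 1, st.2 + 1) else st
        let c : Int := (PySem.Chars.count q.2 closer : Int)
        (st1.1 - c, max 0 (st1.2 - c)))
      st)
    = segs.foldl (pvTStep closer) st := by
  intro segs
  induction segs with
  | nil => intro k hk st; simp [PySem.List.enumerate_nil]
  | cons s rest ih =>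
    intro k hk st
    rw [PySem.List.enumerate_cons, List.foldl_cons, List.foldl_cons]
    have hk0 : k ≠ 0 := by omega
    simp only [if_pos hk0]
    rw [ih (k + 1) (by omega)]
    rfl

-- B's whole transfer fold on a nonempty segment list
theorem pvTransferConsFold (closer : List Char) (s0 : List Char) (rest : List (List Char)) :
    ((PySem.List.enumerate (s0 :: rest) 0).foldl
      (fun st q =>
        let st1 := if q.1 ≠ 0 then (st.1 + 1, st.2 + 1) else st
        let c : Int := (PySem.Chars.count q.2 closer : Int)
        (st1.1 - c, max 0 (st1.2 - c)))
      ((0 : Int), (0 : Int)))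
    = rest.foldl (pvTStep closer)
        ((0 : Int) - (PySem.Chars.count s0 closer : Int),
         max 0 ((0 : Int) - (PySem.Chars.count s0 closer : Int))) := by
  rw [PySem.List.enumerate_cons, List.foldl_cons, pvTransferTail closer rest (0 + 1) (by omega)]
  norm_num

-- A's tail fold (first = false) is the max-plus map accumulated by pvTStep
theorem pvTailMaxPlus (closer : List Char) : ∀ (segs : List (List Char)) (S M d : Int),
    (segs.foldl (pvGndFold closer) (max M (d + S), false)).1
      = max (segs.foldl (pvTStep closer) (S, M)).2 (d + (segs.foldl (pvTStep closer) (S, M)).1) := by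
  intro segs
  induction segs with
  | nil => intro S M d; simp
  | cons s rest ih =>
    intro S M d
    rw [List.foldl_cons, List.foldl_cons]
    have hA : pvGndFold closer (max M (d + S), false) s
        = (max (max 0 (M + 1 - (PySem.Chars.count s closer : Int)))
               (d + (S + 1 - (PySem.Chars.count s closer : Int))), false) := by
      rw [pvGndFold_false]
      congr 1
      omega
    have hT : pvTStep closer (S, M) s
        = (S + 1 - (PySem.Chars.count s closer : Int),
           max 0 (M + 1 - (PySem.Chars.count s closer : Int))) := rfl
    rw [hA, hT, ih]

-- get_nest_depth equals B's transfer map applied to the starting depth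
theorem pvGndEqMaxPlus (text opener closer : String) (d : Int) (hd : 0 ≤ d) (hop : opener ≠ "") :
    get_nest_depth text opener closer d
      = some (max ((transfer text opener closer).getD (0, 0)).2
                  (d + ((transfer text opener closer).getD (0, 0)).1)) := by
  have hop' : opener.toList ≠ [] := by
    intro h; exact hop (by simpa using congrArg String.ofList h)
  have hE : opener.toList.isEmpty = false := by simpa [List.isEmpty_iff] using hop'
  rw [get_nest_depth, transfer, if_neg (by omega)]
  simp only [PySem.Chars.split?, hE, Bool.false_eq_true, if_false]
  cases hsegs : PySem.Chars.splitOn text.toList opener.toList with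
  | nil => simp [PySem.List.enumerate_nil]; omega
  | cons s0 rest =>
    simp only [Option.getD_some]
    rw [pvTransferConsFold]
    have hahead : pvGndFold closer.toList (d, true) s0
        = (max (max 0 ((0 : Int) - (PySem.Chars.count s0 closer.toList : Int)))
               (d + ((0 : Int) - (PySem.Chars.count s0 closer.toList : Int))), false) := by
      rw [pvGndFold_true]
      congr 1
      by_cases hd0 : d = 0
      · rw [if_pos hd0]; omega
      · rw [if_neg hd0]; omega
    rw [List.foldl_cons, hahead, pvTailMaxPlus]

-- the folded depth of A stays nonnegative
theorem pvFoldNonneg (closer : List Char) : ∀ (segs : List (List Char)) (d : Int) (first : Bool),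
    0 ≤ d → 0 ≤ (segs.foldl (pvGndFold closer) (d, first)).1 := by
  intro segs
  induction segs with
  | nil => intro d first hd; simpa
  | cons s t ih =>
    intro d first hd
    rw [List.foldl_cons]
    cases first
    · rw [pvGndFold_false]; exact ih _ _ (le_max_left _ _)
    · rw [pvGndFold_true]
      by_cases h : d = 0
      · rw [if_pos h]; exact ih _ _ hd
      · rw [if_neg h]; exact ih _ _ (le_max_left _ _)

theorem pvGndNonneg (text opener closer : String) (d : Int) (hd : 0 ≤ d) :
    0 ≤ (get_nest_depth text opener closer d).getD 0 := by
  rw [get_nest_depth, if_neg (by omega)]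
  cases h : PySem.Chars.split? text.toList opener.toList with
  | none => simp
  | some segs => simpa using pvFoldNonneg closer.toList segs d true hd

-- insert-loop lookups: a key not in the list is untouched, a key in the list gets g k
theorem pvGetDFoldInsertOut {κ ν : Type} [BEq κ] [LawfulBEq κ] (g : κ → ν) (d0 : ν) :
    ∀ (l : List κ) (d : PySem.Dict κ ν) (k : κ), k ∉ l →
      (l.foldl (fun d n => d.insert n (g n)) d).getD k d0 = d.getD k d0 := by
  intro l
  induction l with
  | nil => intro d k _; rfl
  | cons a t ih =>
    intro d k hk
    rw [List.foldl_cons, ih _ k (fun h => hk (List.mem_cons_of_mem a h))]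
    exact PySem.Dict.getD_insert_of_ne d _ _ (fun h => hk (h ▸ List.mem_cons_self))

theorem pvGetDFoldInsert {κ ν : Type} [BEq κ] [LawfulBEq κ] (g : κ → ν) (d0 : ν) :
    ∀ (l : List κ) (d : PySem.Dict κ ν) (k : κ), k ∈ l →
      (l.foldl (fun d n => d.insert n (g n)) d).getD k d0 = g k := by
  intro l
  induction l with
  | nil => intro d k hk; cases hk
  | cons a t ih =>
    intro d k hk
    rw [List.foldl_cons]
    by_cases ht : k ∈ t
    · exact ih _ k ht
    · have hka : k = a := by
        rcases List.mem_cons.mp hk with h | h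
        · exact h
        · exact absurd h ht
      subst hka
      rw [pvGetDFoldInsertOut g d0 t _ k ht]
      exact PySem.Dict.getD_insert_self d k (g k) d0

-- the any-over-dict-values test equals the any-over-list test
theorem pvAnyValues {ν : Type} [Inhabited ν] (g : (String × String) → ν) (p : ν → Bool) (nests : List (String × String)) :
    ((nests.foldl (fun d n => d.insert n (g n)) (PySem.Dict.empty : PySem.Dict (String × String) ν)).values.any p)
      = (nests.map g).any p := by
  have hnd := PySem.Dict.nodup_keys_foldl_insert (f := fun _ n => g n)
    nests (PySem.Dict.empty : PySem.Dict (String × String) ν) PySem.Dict.nodup_keys_empty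
  rw [PySem.Dict.values_eq_map_keys _ hnd (g (default))]
  rw [PySem.Dict.keys_foldl_insert]
  rw [show (PySem.Dict.empty : PySem.Dict (String × String) ν).keys = PySem.Set.empty from rfl,
    PySem.Set.update_empty]
  refine Bool.eq_iff_iff.mpr ?_
  simp only [List.any_map, List.any_eq_true, Function.comp_apply, PySem.Set.mem_ofList]
  constructor
  · rintro ⟨k, hk, hp⟩
    exact ⟨k, hk, by rwa [pvGetDFoldInsert g _ nests _ k hk] at hp⟩
  · rintro ⟨k, hk, hp⟩
    exact ⟨k, hk, by rwa [pvGetDFoldInsert g _ nests _ k hk]⟩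

-- B's positional step equals A's per-nest depth recomputation, under the dict/list invariant
theorem pvStepEq (nests : List (String × String)) (item : String)
    (hop : ∀ p ∈ nests, p.1 ≠ "") (dA : PySem.Dict (String × String) Int) (dB : List Int)
    (hlen : dB.length = nests.length)
    (hinv : ∀ (i : Nat) (h : i < nests.length), dA.getD nests[i] 0 = dB.getD i 0)
    (hnn : ∀ x ∈ dB, 0 ≤ x) :
    pvStep (pvTr nests item) dB
      = nests.map (fun nest => (get_nest_depth item nest.1 nest.2 (dA.getD nest 0)).getD 0) := by
  apply List.ext_getElem
  · simp only [pvStep, pvTr, List.length_map, List.length_zip, hlen, Nat.min_self]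
  · intro i h1 h2
    have hi : i < nests.length := by simpa using h2
    have hiB : i < dB.length := by omega
    simp only [pvStep, pvTr, List.getElem_map, List.getElem_zip]
    have e1 : dA.getD nests[i] 0 = dB[i] := by
      rw [hinv i hi, List.getD_eq_getElem _ _ hiB]
    rw [e1, pvGndEqMaxPlus item (nests[i].1) (nests[i].2) (dB[i])
      (hnn _ (List.getElem_mem _)) (hop _ (List.getElem_mem _))]
    simp only [Option.getD_some]

-- the common recursive specification: chunks of the remaining items, given the
-- current depth row and the pending buffer
def pvSpec (nests : List (String × String)) (delimiter : String) : List String → List Int → List String → List String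
  | [], _, pend => if pend.length ≠ 0 then [PySem.Str.join delimiter pend] else []
  | item :: rest, ds, pend =>
    let ds' := pvStep (pvTr nests item) ds
    if ds'.any (fun v => decide (v ≠ 0)) then pvSpec nests delimiter rest ds' (pend ++ [item])
    else PySem.Str.join delimiter (pend ++ [item]) :: pvSpec nests delimiter rest ds' []

-- A's whole computation (fold plus trailing flush) equals the specification
theorem pvALoop (nests : List (String × String)) (delimiter : String)
    (hop : ∀ p ∈ nests, p.1 ≠ "") :
    ∀ (items : List String) (res pend : List String)
      (dA : PySem.Dict (String × String) Int) (dB : List Int),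
      dB.length = nests.length →
      (∀ (i : Nat) (h : i < nests.length), dA.getD nests[i] 0 = dB.getD i 0) →
      (∀ x ∈ dB, 0 ≤ x) →
      (let fin := items.foldl (fun st item =>
          let its := st.2.1 ++ [item]
          let depth := nests.foldl
            (fun d nest => d.insert nest ((get_nest_depth item nest.1 nest.2 (st.2.2.getD nest 0)).getD 0)) PySem.Dict.empty
          if depth.values.any (fun v => decide (v ≠ 0)) then (st.1, its, depth)
          else (st.1 ++ [PySem.Str.join delimiter its], ([] : List String), depth))
        (res, pend, dA)
       ; if fin.2.1.length ≠ 0 then fin.1 ++ [PySem.Str.join delimiter fin.2.1] else fin.1)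
      = res ++ pvSpec nests delimiter items dB pend := by
  intro items
  induction items with
  | nil =>
    intro res pend dA dB _ _ _
    simp only [List.foldl_nil, pvSpec]
    split_ifs <;> simp
  | cons item rest ih =>
    intro res pend dA dB hlen hinv hnn
    have hnn' : ∀ k ∈ nests, 0 ≤ dA.getD k 0 := by
      intro k hk
      obtain ⟨i, hi, rfl⟩ := List.mem_iff_getElem.mp hk
      rw [hinv i hi, List.getD_eq_getElem _ _ (by omega)]
      exact hnn _ (List.getElem_mem _)
    have hs := pvStepEq nests item hop dA dB hlen hinv hnn
    have hcond : ((nests.foldl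
          (fun d nest => d.insert nest ((get_nest_depth item nest.1 nest.2 (dA.getD nest 0)).getD 0))
          PySem.Dict.empty).values.any (fun v => decide (v ≠ 0)))
        = ((nests.map (fun nest => (get_nest_depth item nest.1 nest.2 (dA.getD nest 0)).getD 0)).any
            (fun v => decide (v ≠ 0))) :=
      pvAnyValues (fun nest => (get_nest_depth item nest.1 nest.2 (dA.getD nest 0)).getD 0) _ nests
    have hinv' : ∀ (i : Nat) (h : i < nests.length),
        (nests.foldl
          (fun d nest => d.insert nest ((get_nest_depth item nest.1 nest.2 (dA.getD nest 0)).getD 0))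
          PySem.Dict.empty).getD nests[i] 0
        = (nests.map (fun nest => (get_nest_depth item nest.1 nest.2 (dA.getD nest 0)).getD 0)).getD i 0 := by
      intro i hi
      rw [pvGetDFoldInsert _ _ nests _ _ (List.getElem_mem _),
        List.getD_eq_getElem _ _ (by simpa using hi), List.getElem_map]
    have hnn2 : ∀ x ∈ nests.map (fun nest => (get_nest_depth item nest.1 nest.2 (dA.getD nest 0)).getD 0), 0 ≤ x := by
      intro x hx
      obtain ⟨k, hk, rfl⟩ := List.mem_map.mp hx
      exact pvGndNonneg item k.1 k.2 _ (hnn' k hk)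
    simp only [List.foldl_cons, pvSpec, hs, hcond]
    by_cases hc : ((nests.map (fun nest => (get_nest_depth item nest.1 nest.2 (dA.getD nest 0)).getD 0)).any
        (fun v => decide (v ≠ 0))) = true
    · rw [if_pos hc, if_pos hc]
      exact ih res (pend ++ [item]) _ _ (by simp) hinv' hnn2
    · rw [if_neg hc, if_neg hc]
      have := ih (res ++ [PySem.Str.join delimiter (pend ++ [item])]) [] _ _ (by simp) hinv' hnn2
      rw [this]
      simp

-- recursive form of B's flag scan
def pvFlagsRec : List (List (Int × Int)) → List Int → List Bool
  | [], _ => []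
  | tr :: rest, ds => (!((pvStep tr ds).any (fun v => decide (v ≠ 0)))) :: pvFlagsRec rest (pvStep tr ds)

-- B's flag fold accumulates pvFlagsRec
theorem pvBflags : ∀ (trs : List (List (Int × Int))) (acc : List Bool) (ds : List Int),
    (trs.foldl (fun st tr =>
        let depths := pvStep tr st.2
        (st.1 ++ [!(depths.any (fun v => decide (v ≠ 0)))], depths)) (acc, ds)).1
      = acc ++ pvFlagsRec trs ds := by
  intro trs
  induction trs with
  | nil => intro acc ds; simp [pvFlagsRec]
  | cons tr rest ih =>
    intro acc ds
    rw [List.foldl_cons, pvFlagsRec]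
    simp only []
    rw [ih]
    simp

-- B's grouping step and trailing flush, named for the proofs (definitional forms
-- of the inline code in nest_aware_iterator_alt)
def pvGStep (delimiter : String) (items : List String) (st : List String × Int) (q : Int × Bool) : List String × Int :=
  if q.2 then
    (st.1 ++ [PySem.Str.join delimiter (PySem.List.slice items (some st.2) (some (q.1 + 1)))], q.1 + 1)
  else st

def pvPost (delimiter : String) (items : List String) (grp : List String × Int) : List String :=
  if grp.2 < PySem.List.len items then
    grp.1 ++ [PySem.Str.join delimiter (PySem.List.slice items (some grp.2) none)]
  else grp.1

-- B's grouping fold plus trailing flush equals the specification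
theorem pvGroupLoop (nests : List (String × String)) (delimiter : String) :
    ∀ (rest : List String) (ds : List Int) (pre pend out : List String),
      pvPost delimiter (pre ++ pend ++ rest)
        ((PySem.List.enumerate (pvFlagsRec (rest.map (pvTr nests)) ds)
            (((pre.length + pend.length : Nat) : Int))).foldl
          (pvGStep delimiter (pre ++ pend ++ rest)) (out, ((pre.length : Nat) : Int)))
      = out ++ pvSpec nests delimiter rest ds pend := by
  intro rest
  induction rest with
  | nil =>
    intro ds pre pend out
    simp only [List.map_nil, pvFlagsRec, PySem.List.enumerate_nil, List.foldl_nil, pvSpec,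
      List.append_nil, pvPost]
    rw [PySem.List.slice_from_natCast]
    have hdrop : (pre ++ pend).drop pre.length = pend := by simp
    rw [hdrop]
    simp only [PySem.List.len_eq, List.length_append]
    split_ifs with h1 h2
    · rfl
    · exfalso; omega
    · exfalso; omega
    · simp
  | cons it rest' ih =>
    intro ds pre pend out
    simp only [List.map_cons, pvFlagsRec, PySem.List.enumerate_cons, List.foldl_cons]
    by_cases hc : ((pvStep (pvTr nests it) ds).any (fun v => decide (v ≠ 0))) = true
    · -- some depth nonzero: flag false, state unchanged, item joins the pending buffer
      have hg : pvGStep delimiter (pre ++ pend ++ it :: rest') (out, ((pre.length : Nat) : Int))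
          ((((pre.length + pend.length : Nat) : Int)),
           !((pvStep (pvTr nests it) ds).any (fun v => decide (v ≠ 0))))
          = (out, ((pre.length : Nat) : Int)) := by
        simp only [pvGStep, hc, Bool.not_true, Bool.false_eq_true, if_false]
      rw [hg]
      have e1 : pre ++ pend ++ it :: rest' = pre ++ (pend ++ [it]) ++ rest' := by simp
      have e2 : ((pre.length + pend.length : Nat) : Int) + 1
          = ((pre.length + (pend ++ [it]).length : Nat) : Int) := by
        simp only [List.length_append, List.length_cons, List.length_nil]
        push_cast
        ring
      have hspec : pvSpec nests delimiter (it :: rest') ds pend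
          = pvSpec nests delimiter rest' (pvStep (pvTr nests it) ds) (pend ++ [it]) := by
        simp only [pvSpec, hc, if_true]
      rw [e1, e2, hspec]
      exact ih (pvStep (pvTr nests it) ds) pre (pend ++ [it]) out
    · -- all depths zero: flag true, emit items[start:i+1] and restart after it
      have hcf : ((pvStep (pvTr nests it) ds).any (fun v => decide (v ≠ 0))) = false :=
        Bool.not_eq_true _ ▸ eq_false_of_ne_true hc
      have hslice : PySem.List.slice (pre ++ pend ++ it :: rest')
          (some ((pre.length : Nat) : Int)) (some (((pre.length + pend.length : Nat) : Int) + 1))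
          = pend ++ [it] := by
        have hcast : ((pre.length + pend.length : Nat) : Int) + 1
            = (((pre.length + pend.length + 1 : Nat)) : Int) := by push_cast; ring
        rw [hcast, PySem.List.slice_natCast]
        have hdrop : (pre ++ pend ++ it :: rest').drop pre.length = (pend ++ [it]) ++ rest' := by
          have h0 : pre ++ pend ++ it :: rest' = pre ++ ((pend ++ [it]) ++ rest') := by simp
          rw [h0, List.drop_left]
        rw [hdrop]
        have h1 : pre.length + pend.length + 1 - pre.length = (pend ++ [it]).length := by
          simp only [List.length_append, List.length_cons, List.length_nil]
          omega
        rw [h1, List.take_left]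
      have hg : pvGStep delimiter (pre ++ pend ++ it :: rest') (out, ((pre.length : Nat) : Int))
          ((((pre.length + pend.length : Nat) : Int)),
           !((pvStep (pvTr nests it) ds).any (fun v => decide (v ≠ 0))))
          = (out ++ [PySem.Str.join delimiter (pend ++ [it])],
             (((pre ++ pend ++ [it]).length : Nat) : Int)) := by
        simp only [pvGStep, hcf, Bool.not_false, if_pos]
        rw [hslice]
        congr 1
        simp only [List.length_append, List.length_cons, List.length_nil]
        push_cast
        ring
      rw [hg]
      have e1 : pre ++ pend ++ it :: rest' = pre ++ pend ++ [it] ++ [] ++ rest' := by simp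
      have e3 : ((pre.length + pend.length : Nat) : Int) + 1
          = (((pre ++ pend ++ [it]).length : Nat) : Int) := by
        simp only [List.length_append, List.length_cons, List.length_nil]
        push_cast
        ring
      have hspec : pvSpec nests delimiter (it :: rest') ds pend
          = PySem.Str.join delimiter (pend ++ [it])
              :: pvSpec nests delimiter rest' (pvStep (pvTr nests it) ds) [] := by
        simp only [pvSpec, hcf, Bool.false_eq_true, if_false]
      rw [e1, e3, hspec]
      have hout : out ++ (PySem.Str.join delimiter (pend ++ [it])
            :: pvSpec nests delimiter rest' (pvStep (pvTr nests it) ds) [])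
          = (out ++ [PySem.Str.join delimiter (pend ++ [it])])
            ++ pvSpec nests delimiter rest' (pvStep (pvTr nests it) ds) [] := by simp
      rw [hout]
      exact ih (pvStep (pvTr nests it) ds) (pre ++ pend ++ [it]) []
        (out ++ [PySem.Str.join delimiter (pend ++ [it])])

-- ===== VERDICT (by name: the statement is the Claim_ definition above) =====
theorem nest_aware_iterator_spec : Claim_equal_nest_aware_iterator := by
  intro iterator nests delimiter _ hpre
  unfold Spec_nest_aware_iterator
  rcases hpre with h | hop
  · subst h; rfl
  · have hA : nest_aware_iterator iterator nests delimiter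
        = pvSpec nests delimiter iterator (List.replicate nests.length 0) [] := by
      have := pvALoop nests delimiter hop iterator [] [] PySem.Dict.empty
        (List.replicate nests.length 0) (by simp)
        (fun i hi => by rw [PySem.Dict.getD_empty, List.getD_eq_getElem _ _ (by simpa using hi)]; simp)
        (fun x hx => by rw [List.eq_of_mem_replicate hx])
      simpa [nest_aware_iterator] using this
    have hform : nest_aware_iterator_alt iterator nests delimiter
        = pvPost delimiter iterator
            ((PySem.List.enumerate
                ((iterator.map (pvTr nests)).foldl
                  (fun st tr =>
                    let depths := pvStep tr st.2
                    (st.1 ++ [!(depths.any (fun v => decide (v ≠ 0)))], depths))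
                  (([] : List Bool), List.replicate nests.length (0 : Int))).1 0).foldl
              (pvGStep delimiter iterator) (([] : List String), (0 : Int))) := rfl
    have hB : nest_aware_iterator_alt iterator nests delimiter
        = pvSpec nests delimiter iterator (List.replicate nests.length 0) [] := by
      rw [hform, pvBflags]
      exact pvGroupLoop nests delimiter iterator (List.replicate nests.length 0) [] [] []
    rw [hA, hB]
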